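-- pv_equiv track=rewrite | github.com/xiafei571/itu-gan | 0_generate_json.py | get_columns_dict
-- ===== SOURCE A (Python) =====
-- folder_dict = {"p": "physical", "n": "network", "v": "virtual"}
--
-- def get_columns_dict(columns):
--     column_dict = {}
--     for column in columns:
--         file_type = folder_dict[column[0]]
--         path_list = column_dict.get(file_type, [])
--         path_list.append(column)
--         column_dict[file_type] = path_list
--
--     return column_dict
-- ===== SOURCE B (Python) =====
-- folder_dict = {"p": "physical", "n": "network", "v": "virtual"}
--
-- def get_columns_dict(columns):
--     # Two-pass grouping: first the distinct file types in order of first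
--     # appearance, then one filter pass per file type.
--     keys = list(dict.fromkeys(folder_dict[c[0]] for c in columns))
--     return {k: [c for c in columns if folder_dict[c[0]] == k] for k in keys}
-- ===== Notes on version B (the rewrite author's own statement) =====
-- stated objective: alternative
-- what changed: A builds the dict incrementally (get-default, append, reinsert per element); B first computes the ordered distinct file types with dict.fromkeys and then emits each group by a filter pass over the list.
import Mathlib
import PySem

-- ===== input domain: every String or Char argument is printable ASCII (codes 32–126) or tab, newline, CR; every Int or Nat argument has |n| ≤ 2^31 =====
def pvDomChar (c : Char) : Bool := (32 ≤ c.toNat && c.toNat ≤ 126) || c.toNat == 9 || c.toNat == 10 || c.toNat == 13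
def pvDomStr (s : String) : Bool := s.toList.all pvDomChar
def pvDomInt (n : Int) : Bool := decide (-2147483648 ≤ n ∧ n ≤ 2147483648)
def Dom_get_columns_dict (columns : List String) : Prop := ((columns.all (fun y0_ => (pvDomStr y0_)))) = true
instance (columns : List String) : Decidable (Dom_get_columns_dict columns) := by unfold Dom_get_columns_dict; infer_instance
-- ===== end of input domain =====

-- B replaces A's incremental dict building (get-default / append / reinsert) by a
-- two-pass grouping: ordered distinct file types first, then one filter per type
-- (objective: alternative decomposition, similar cost).


-- ===== PORT A =====
-- Python's 1-char string column[0] is modelled as the Char; the module dict folder_dict keyed accordingly.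
def pvFolderDict : PySem.Dict Char String :=
  PySem.Dict.ofList [('p', "physical"), ('n', "network"), ('v', "virtual")]

-- folder_dict[column[0]]; total form (defaults ""), exact under Pre_ (nonempty, first char a key).
def pvFileType (column : String) : String :=
  match PySem.Str.pyGet? column 0 with
  | some ch => (pvFolderDict.get? ch).getD ""
  | none => ""

def get_columns_dict (columns : List String) : List (String × List String) :=
  (columns.foldl (fun d column =>
      let file_type := pvFileType column
      let path_list := d.getD file_type []
      d.insert file_type (path_list ++ [column])) PySem.Dict.empty).items

-- ===== PORT B =====
def get_columns_dict_alt (columns : List String) : List (String × List String) :=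
  let keys := PySem.List.dedup (columns.map pvFileType)
  keys.map (fun k => (k, columns.filter (fun c => pvFileType c == k)))

-- ===== PRECONDITION & SPEC =====
-- Pre_ excludes exactly the inputs where Python A raises: an empty string (IndexError on
-- column[0]) or a first character that is not a folder_dict key (KeyError).
def Pre_get_columns_dict (columns : List String) : Prop :=
  (columns.all (fun c =>
    match c.toList with
    | [] => false
    | ch :: _ => ch == 'p' || ch == 'n' || ch == 'v')) = true
instance (columns : List String) : Decidable (Pre_get_columns_dict columns) := by
  unfold Pre_get_columns_dict; infer_instance
def pvWitness_get_columns_dict : List String := ["p_a", "n_b", "p_c", "v"]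

def Spec_get_columns_dict (columns : List String) (out : List (String × List String)) : Prop := out = get_columns_dict_alt columns
instance (columns : List String) (out : List (String × List String)) : Decidable (Spec_get_columns_dict columns out) := by unfold Spec_get_columns_dict; infer_instance

-- ===== CLAIM (what is proved, stated in full; the proofs are below) =====
def Claim_equal_get_columns_dict : Prop := ∀ (columns : List String), Dom_get_columns_dict columns → Pre_get_columns_dict columns → Spec_get_columns_dict columns (get_columns_dict columns)

-- ===== LEMMAS AND PROOFS =====

-- A's loop body is exactly a Dict.modify with default [] (definitional).
theorem pvFold_eq_modify (columns : List String) :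
    columns.foldl (fun d column =>
      let file_type := pvFileType column
      let path_list := d.getD file_type []
      d.insert file_type (path_list ++ [column])) PySem.Dict.empty
    = columns.foldl (fun d c => d.modify (pvFileType c) [] (· ++ [c])) PySem.Dict.empty := rfl

theorem pvKeys_fold (columns : List String) :
    (columns.foldl (fun d c => d.modify (pvFileType c) [] (· ++ [c])) PySem.Dict.empty).keys
    = PySem.List.dedup (columns.map pvFileType) := by
  have h := PySem.Dict.keys_foldl_modify_key columns pvFileType ([] : List String)
      (fun _ c => (· ++ [c])) PySem.Dict.empty
  simpa [PySem.Dict.keys_empty, PySem.Set.update_nil_left] using h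

theorem pvGetD_fold (columns : List String) (k : String) :
    (columns.foldl (fun d c => d.modify (pvFileType c) [] (· ++ [c])) PySem.Dict.empty).getD k []
    = columns.filter (fun c => pvFileType c == k) := by
  have hmap : (columns.map (fun c => (pvFileType c, c))).foldl
      (fun d p => d.modify p.1 [] (· ++ [p.2])) PySem.Dict.empty
      = columns.foldl (fun d c => d.modify (pvFileType c) [] (· ++ [c])) PySem.Dict.empty := by
    rw [List.foldl_map]
  rw [← hmap, PySem.Dict.getD_foldl_modify_append]
  simp [List.filter_map, Function.comp_def]

theorem pvNodupKeys (columns : List String) :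
    (columns.foldl (fun d c => d.modify (pvFileType c) [] (· ++ [c])) PySem.Dict.empty).keys.Nodup := by
  exact PySem.Dict.nodup_keys_foldl_modify_key columns pvFileType ([] : List String)
      (fun _ c => (· ++ [c])) PySem.Dict.empty (by simp [PySem.Dict.keys_empty])

-- ===== VERDICT (by name: the statement is the Claim_ definition above) =====
theorem get_columns_dict_spec : Claim_equal_get_columns_dict := by
  intro columns _ _
  unfold Spec_get_columns_dict get_columns_dict get_columns_dict_alt
  rw [pvFold_eq_modify]
  rw [PySem.Dict.items_eq_map_keys _ (pvNodupKeys columns) []]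
  rw [pvKeys_fold]
  exact List.map_congr_left (fun k _ => by rw [pvGetD_fold])
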